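-- pv_equiv track=rewrite | github.com/slalom/dataops-infra | autodocs/build.py | _proper
-- ===== SOURCE A (Python) =====
-- SPECIAL_CASE_WORDS = [
--     "AWS",
--     "ECR",
--     "ECS",
--     "IAM",
--     "VPC",
--     "DBT",
--     "EC2",
--     "RDS",
--     "MySQL",
--     "ML",
--     "MLOps",
--     "SFTP",
-- ]
--
-- def _proper(str: str, title_case=True, special_case_words=None):
--     """
--     Return the same string in proper case, respected override rules for
--     acronyms and special-cased words.
--     """
--     special_case_words = special_case_words or SPECIAL_CASE_WORDS
--     word_lookup = {w.lower(): w for w in special_case_words}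
--     if title_case:
--         str = str.title()
--     words = str.split(" ")
--     new_words = []
--     for word in words:
--         new_subwords = []
--         for subword in word.split("-"):
--             new_subwords.append(word_lookup.get(subword.lower(), subword))
--         new_word = "-".join(new_subwords)
--         new_words.append(new_word)
--     return " ".join(new_words)
-- ===== SOURCE B (Python) =====
-- SPECIAL_CASE_WORDS = [
--     "AWS", "ECR", "ECS", "IAM", "VPC", "DBT",
--     "EC2", "RDS", "MySQL", "ML", "MLOps", "SFTP",
-- ]
--
--
-- def _proper(str: str, title_case=True, special_case_words=None):
--     """Proper-case `str`, overriding acronyms/special words, in one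
--     delimiter-preserving scan instead of nested split/join passes."""
--     special_case_words = special_case_words or SPECIAL_CASE_WORDS
--     word_lookup = {w.lower(): w for w in special_case_words}
--     if title_case:
--         str = str.title()
--     out = []
--     tok = []
--     for ch in str:
--         if ch == " " or ch == "-":
--             word = "".join(tok)
--             out.append(word_lookup.get(word.lower(), word))
--             out.append(ch)
--             tok = []
--         else:
--             tok.append(ch)
--     word = "".join(tok)
--     out.append(word_lookup.get(word.lower(), word))
--     return "".join(out)
-- ===== Notes on version B (the rewrite author's own statement) =====
-- stated objective: alternative
-- what changed: Replaces A's nested space-split / hyphen-split with two join steps by a single delimiter-preserving left-to-right scan that flushes each token through the lookup as it meets a space or hyphen.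
import Mathlib
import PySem

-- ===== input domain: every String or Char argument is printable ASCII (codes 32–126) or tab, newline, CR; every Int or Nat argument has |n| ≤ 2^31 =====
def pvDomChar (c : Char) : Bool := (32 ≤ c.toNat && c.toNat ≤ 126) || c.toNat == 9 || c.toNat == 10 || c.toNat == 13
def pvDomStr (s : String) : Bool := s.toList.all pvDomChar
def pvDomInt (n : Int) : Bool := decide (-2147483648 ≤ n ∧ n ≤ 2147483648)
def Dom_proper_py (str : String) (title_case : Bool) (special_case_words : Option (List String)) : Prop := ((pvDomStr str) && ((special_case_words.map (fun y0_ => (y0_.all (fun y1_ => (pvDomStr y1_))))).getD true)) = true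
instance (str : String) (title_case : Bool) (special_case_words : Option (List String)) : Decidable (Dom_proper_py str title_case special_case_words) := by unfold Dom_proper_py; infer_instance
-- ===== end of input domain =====

-- B replaces A's nested space-split / hyphen-split with two join steps by a single
-- delimiter-preserving scan that flushes each token through the lookup at each space or hyphen
-- (objective: alternative, same O(n) cost).

-- ===== PORT A =====
-- helpers shared by both ports: both Pythons contain the identical lines
-- `special_case_words = special_case_words or SPECIAL_CASE_WORDS`,
-- `word_lookup = {w.lower(): w for w in special_case_words}`, `str = str.title()`,
-- and the identical lookup expression `word_lookup.get(tok.lower(), tok)`.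
def pvSpecialCaseWords : List String :=
  ["AWS", "ECR", "ECS", "IAM", "VPC", "DBT", "EC2", "RDS", "MySQL", "ML", "MLOps", "SFTP"]

-- `special_case_words or SPECIAL_CASE_WORDS` (None and [] are falsy)
def pvWords (special_case_words : Option (List String)) : List String :=
  match special_case_words with
  | none => pvSpecialCaseWords
  | some l => if l.isEmpty then pvSpecialCaseWords else l

-- `{w.lower(): w for w in special_case_words}`
def pvLookup (ws : List String) : PySem.Dict String String :=
  ws.foldl (fun d w => d.insert (PySem.Str.lower w) w) PySem.Dict.empty

-- hand port of Python `str.title()` (PySem has no title): a letter is uppercased when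
-- the previous character is not a letter, lowercased otherwise; exact on the ASCII domain,
-- where the cased characters are exactly the letters.
def pvTitleGo (prevCased : Bool) : List Char → List Char
  | [] => []
  | c :: cs =>
      (if PySem.Chars.isalpha c then
        (if prevCased then PySem.Chars.lowerChar c else PySem.Chars.upperChar c)
       else c) :: pvTitleGo (PySem.Chars.isalpha c) cs

def pvTitle (cs : List Char) : List Char := pvTitleGo false cs

-- `word_lookup.get(tok.lower(), tok)` on a token given as chars
def pvApply (d : PySem.Dict String String) (tok : List Char) : List Char :=
  (d.getD (String.ofList (PySem.Chars.lower tok)) (String.ofList tok)).toList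

def proper_py (str : String) (title_case : Bool) (special_case_words : Option (List String)) : String :=
  let d := pvLookup (pvWords special_case_words)
  let s := if title_case then pvTitle str.toList else str.toList
  let words := PySem.Chars.splitOn s [' ']
  let new_words := words.map (fun w =>
    PySem.Chars.join ['-'] ((PySem.Chars.splitOn w ['-']).map (pvApply d)))
  String.ofList (PySem.Chars.join [' '] new_words)

-- ===== PORT B =====
-- the single scan of Source B: `tok` is the pending token, flushed through the lookup
-- at every ' ' or '-' and once at the end
def pvScan (d : PySem.Dict String String) : List Char → List Char → List Char
  | [], tok => pvApply d tok
  | c :: cs, tok =>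
      if c = ' ' ∨ c = '-' then pvApply d tok ++ c :: pvScan d cs []
      else pvScan d cs (tok ++ [c])

def proper_py_alt (str : String) (title_case : Bool) (special_case_words : Option (List String)) : String :=
  let d := pvLookup (pvWords special_case_words)
  let s := if title_case then pvTitle str.toList else str.toList
  String.ofList (pvScan d s [])

-- ===== PRECONDITION & SPEC =====
def Spec_proper_py (str : String) (title_case : Bool) (special_case_words : Option (List String)) (out : String) : Prop := out = proper_py_alt str title_case special_case_words
instance (str : String) (title_case : Bool) (special_case_words : Option (List String)) (out : String) : Decidable (Spec_proper_py str title_case special_case_words out) := by unfold Spec_proper_py; infer_instance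

-- ===== CLAIM (what is proved, stated in full; the proofs are below) =====
def Claim_equal_proper_py : Prop := ∀ (str : String) (title_case : Bool) (special_case_words : Option (List String)), Dom_proper_py str title_case special_case_words → Spec_proper_py str title_case special_case_words (proper_py str title_case special_case_words)

-- ===== LEMMAS AND PROOFS =====

-- prepend chars to the first piece of a split
def pvConsHead (p : List Char) : List (List Char) → List (List Char)
  | [] => [p]
  | h :: t => (p ++ h) :: t

-- structural description of splitting on a single character
def pvSp (d : Char) : List Char → List (List Char)
  | [] => [[]]
  | c :: cs => if c = d then [] :: pvSp d cs else pvConsHead [c] (pvSp d cs)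

theorem pvSp_ne_nil (d : Char) (l : List Char) : pvSp d l ≠ [] := by
  cases l with
  | nil => simp [pvSp]
  | cons c cs =>
    simp only [pvSp]
    split
    · simp
    · cases h : pvSp d cs <;> simp [pvConsHead]

theorem pvConsHead_nil {ws : List (List Char)} (h : ws ≠ []) : pvConsHead [] ws = ws := by
  cases ws with
  | nil => exact absurd rfl h
  | cons w t => simp [pvConsHead]

theorem pvConsHead_consHead (a b : List Char) (ws : List (List Char)) :
    pvConsHead (a ++ b) ws = pvConsHead a (pvConsHead b ws) := by
  cases ws <;> simp [pvConsHead]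

theorem pvGo_char (d : Char) : ∀ (fuel : Nat) (l cur : List Char) (acc : List (List Char)),
    l.length < fuel →
    PySem.Chars.splitOn.go [d] fuel l cur acc
      = acc.reverse ++ pvConsHead cur.reverse (pvSp d l) := by
  intro fuel
  induction fuel with
  | zero => intro l cur acc h; omega
  | succ fuel ih =>
    intro l cur acc h
    cases l with
    | nil =>
      rw [PySem.Chars.splitOn.go]
      · simp [pvSp, pvConsHead]
      · omega
    | cons c rest =>
      rw [PySem.Chars.splitOn.go]
      simp only [List.isPrefixOf, List.length_cons] at *
      by_cases hc : d = c
      · subst hc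
        simp only [BEq.rfl, Bool.true_and, if_pos, List.drop_succ_cons, List.length_nil,
          List.drop_zero]
        rw [ih rest [] (cur.reverse :: acc) (by omega)]
        simp only [pvSp, List.reverse_cons, List.append_assoc, List.singleton_append,
          List.reverse_nil, pvConsHead_nil (pvSp_ne_nil d rest)]
        cases h' : pvSp d rest with
        | nil => exact absurd h' (pvSp_ne_nil d rest)
        | cons a t => simp [pvConsHead]
      · have hbeq : (d == c) = false := by simp [hc]
        simp only [hbeq, Bool.false_and, Bool.false_eq_true, if_false]
        rw [ih rest (c :: cur) acc (by omega)]
        have : (c :: cur).reverse = cur.reverse ++ [c] := by simp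
        rw [this, pvConsHead_consHead]
        have hcd : ¬ c = d := fun h' => hc h'.symm
        simp [pvSp, hcd]

theorem pvSplitOn_char (d : Char) (l : List Char) :
    PySem.Chars.splitOn l [d] = pvSp d l := by
  rw [PySem.Chars.splitOn.eq_def]
  rw [pvGo_char d (l.length + 1) l [] [] (by omega)]
  simp [pvConsHead_nil (pvSp_ne_nil d l)]

theorem pvSp_no_sep (d : Char) (l : List Char) (h : ∀ c ∈ l, c ≠ d) :
    pvSp d l = [l] := by
  induction l with
  | nil => rfl
  | cons c cs ih =>
    have hc : ¬ c = d := h c (by simp)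
    simp only [pvSp, hc, if_false]
    rw [ih (fun x hx => h x (by simp [hx]))]
    simp [pvConsHead]

theorem pvSp_append (d : Char) (l cs : List Char) (h : ∀ c ∈ l, c ≠ d) :
    pvSp d (l ++ cs) = pvConsHead l (pvSp d cs) := by
  induction l with
  | nil => simp [pvConsHead_nil (pvSp_ne_nil d cs)]
  | cons c rest ih =>
    have hc : ¬ c = d := h c (by simp)
    simp only [List.cons_append, pvSp, hc, if_false]
    rw [ih (fun x hx => h x (by simp [hx]))]
    have : ([c] : List Char) ++ rest = c :: rest := rfl
    rw [← pvConsHead_consHead, this]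

-- `p ++` distributes into a join's first piece
theorem pvJoin_cons_append (sep p h : List Char) (t : List (List Char)) :
    PySem.Chars.join sep ((p ++ h) :: t) = p ++ PySem.Chars.join sep (h :: t) := by
  cases t with
  | nil => simp [PySem.Chars.join_singleton]
  | cons q t' => rw [PySem.Chars.join_cons_cons, PySem.Chars.join_cons_cons]; simp

-- A's per-word treatment and A's whole result over char lists
def pvFWord (d : PySem.Dict String String) (w : List Char) : List Char :=
  PySem.Chars.join ['-'] ((pvSp '-' w).map (pvApply d))

def pvACore (d : PySem.Dict String String) (cs : List Char) : List Char :=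
  PySem.Chars.join [' '] ((pvSp ' ' cs).map (pvFWord d))

theorem pvFWord_no_hyphen (d : PySem.Dict String String) (tok : List Char)
    (h : ∀ c ∈ tok, c ≠ '-') : pvFWord d tok = pvApply d tok := by
  unfold pvFWord
  rw [pvSp_no_sep '-' tok h]
  simp [PySem.Chars.join_singleton]

-- the heart of the equivalence: the scan with pending separator-free token `tok`
-- computes A's split/map/join result on `tok ++ cs`
theorem pvScan_eq_ACore (d : PySem.Dict String String) :
    ∀ (cs tok : List Char), (∀ c ∈ tok, ¬ (c = ' ' ∨ c = '-')) →
      pvScan d cs tok = pvACore d (tok ++ cs) := by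
  intro cs
  induction cs with
  | nil =>
    intro tok htok
    have hsp : ∀ c ∈ tok, c ≠ ' ' := fun c hc h' => htok c hc (Or.inl h')
    have hhy : ∀ c ∈ tok, c ≠ '-' := fun c hc h' => htok c hc (Or.inr h')
    simp only [pvScan, List.append_nil, pvACore]
    rw [pvSp_no_sep ' ' tok hsp]
    simp only [List.map_cons, List.map_nil, PySem.Chars.join_singleton]
    exact (pvFWord_no_hyphen d tok hhy).symm
  | cons c cs ih =>
    intro tok htok
    have hsp : ∀ x ∈ tok, x ≠ ' ' := fun x hx h' => htok x hx (Or.inl h')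
    have hhy : ∀ x ∈ tok, x ≠ '-' := fun x hx h' => htok x hx (Or.inr h')
    by_cases hc : c = ' ' ∨ c = '-'
    · simp only [pvScan, hc, if_true]
      rw [ih [] (by simp)]
      simp only [List.nil_append]
      obtain ⟨w, ws, hws⟩ : ∃ w ws, pvSp ' ' cs = w :: ws := by
        cases h : pvSp ' ' cs with
        | nil => exact absurd h (pvSp_ne_nil ' ' cs)
        | cons w ws => exact ⟨w, ws, rfl⟩
      rcases hc with hc | hc
      · subst hc
        unfold pvACore
        rw [pvSp_append ' ' tok (' ' :: cs) hsp]
        have hsp2 : pvSp ' ' (' ' :: cs) = [] :: w :: ws := by simp [pvSp, hws]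
        rw [hsp2]
        simp only [pvConsHead, List.append_nil, List.map_cons, PySem.Chars.join_cons_cons]
        rw [pvFWord_no_hyphen d tok hhy]
        simp [hws]
      · subst hc
        unfold pvACore
        have h1 : tok ++ '-' :: cs = (tok ++ ['-']) ++ cs := by simp
        rw [h1, pvSp_append ' ' (tok ++ ['-']) cs ?hns]
        case hns =>
          intro x hx
          rcases List.mem_append.mp hx with h | h
          · exact hsp x h
          · simp at h; subst h; decide
        rw [hws]
        simp only [pvConsHead, List.map_cons]
        have h2 : (tok ++ ['-']) ++ w = tok ++ '-' :: w := by simp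
        rw [h2]
        have hfw : pvFWord d (tok ++ '-' :: w) = (pvApply d tok ++ ['-']) ++ pvFWord d w := by
          obtain ⟨u, us, hus⟩ : ∃ u us, pvSp '-' w = u :: us := by
            cases h : pvSp '-' w with
            | nil => exact absurd h (pvSp_ne_nil '-' w)
            | cons u us => exact ⟨u, us, rfl⟩
          unfold pvFWord
          rw [pvSp_append '-' tok ('-' :: w) hhy]
          have h3 : pvSp '-' ('-' :: w) = [] :: u :: us := by simp [pvSp, hus]
          rw [h3]
          simp only [pvConsHead, List.append_nil, List.map_cons, PySem.Chars.join_cons_cons]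
          simp [hus]
        rw [hfw, pvJoin_cons_append]
        simp
    · simp only [pvScan, hc, if_false]
      rw [ih (tok ++ [c]) ?_]
      · simp
      · intro x hx
        rcases List.mem_append.mp hx with h | h
        · exact htok x h
        · simp at h; subst h; exact hc

-- ===== VERDICT (by name: the statement is the Claim_ definition above) =====
theorem proper_py_spec : Claim_equal_proper_py := by
  intro str title_case special_case_words _
  unfold Spec_proper_py proper_py proper_py_alt
  simp only [pvSplitOn_char]
  rw [pvScan_eq_ACore _ _ [] (by simp)]
  simp only [List.nil_append, pvACore]
  rfl
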